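-- pv_equiv track=rewrite | github.com/arturoornelasb/tibia-bonelord-469-cipher | scripts/analysis/session26_block_decomposition.py | find_anagram_matches
-- ===== SOURCE A (Python) =====
-- from collections import Counter, defaultdict
--
-- def is_anagram(block, word, max_extra=0):
--     """Check if block is an anagram of word with at most max_extra extra letters."""
--     bc = Counter(block)
--     wc = Counter(word)
--     for ch, cnt in wc.items():
--         if bc.get(ch, 0) < cnt:
--             return False
--     extra = sum(bc.values()) - sum(wc.values())
--     return 0 <= extra <= max_extra
--
-- def get_extra_letters(block, word):
--     """Return the extra letters in block not accounted for by word."""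
--     bc = Counter(block)
--     wc = Counter(word)
--     extras = []
--     for ch in bc:
--         diff = bc[ch] - wc.get(ch, 0)
--         extras.extend([ch] * diff)
--     return ''.join(sorted(extras))
--
-- def find_anagram_matches(block, wordset, max_extra=2):
--     """Find all words in wordset that are anagrams of block (within tolerance)."""
--     results = []
--     block_len = len(block)
--     block_counter = Counter(block)
--     for word in wordset:
--         wlen = len(word)
--         if wlen > block_len or wlen < block_len - max_extra:
--             continue
--         if is_anagram(block, word, max_extra):
--             extra = get_extra_letters(block, word)
--             results.append((word, extra))
--     return results
-- ===== SOURCE B (Python) =====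
-- def find_anagram_matches(block, wordset, max_extra=2):
--     """Find all words in wordset that are anagrams of block (within tolerance)."""
--     sb = sorted(block)
--     n = len(sb)
--     results = []
--     for word in wordset:
--         wlen = len(word)
--         if not (n - max_extra <= wlen <= n):
--             continue
--         j = 0
--         extras = []
--         ok = True
--         for ch in sorted(word):
--             while j < n and sb[j] < ch:
--                 extras.append(sb[j])
--                 j += 1
--             if j < n and sb[j] == ch:
--                 j += 1
--             else:
--                 ok = False
--                 break
--         if ok:
--             extras.extend(sb[j:])
--             results.append((word, ''.join(extras)))
--     return results
-- ===== Notes on version B (the rewrite author's own statement) =====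
-- stated objective: alternative
-- what changed: Replaced the Counter-based multiset helpers with a sort-then-two-pointer merge: block is sorted once, each candidate word is sorted, and a single ordered merge both checks coverage and emits the leftover block letters already in sorted order.
import Mathlib
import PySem

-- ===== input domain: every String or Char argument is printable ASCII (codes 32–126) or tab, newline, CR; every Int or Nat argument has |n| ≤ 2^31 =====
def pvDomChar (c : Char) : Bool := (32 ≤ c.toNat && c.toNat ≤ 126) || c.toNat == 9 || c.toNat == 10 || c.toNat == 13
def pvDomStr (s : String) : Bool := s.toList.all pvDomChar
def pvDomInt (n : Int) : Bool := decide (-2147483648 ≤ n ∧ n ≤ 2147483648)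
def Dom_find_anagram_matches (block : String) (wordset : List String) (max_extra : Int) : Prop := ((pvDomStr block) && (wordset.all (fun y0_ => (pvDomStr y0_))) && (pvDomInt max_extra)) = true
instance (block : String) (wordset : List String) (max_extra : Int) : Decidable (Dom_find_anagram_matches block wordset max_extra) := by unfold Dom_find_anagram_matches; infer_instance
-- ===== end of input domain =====

-- Port A (Counter-based anagram matching) vs port B (sort block once, two-pointer ordered merge
-- per word emitting the leftover letters in order): proved to return the same list on all inputs.


-- ===== PORT A =====
-- is_anagram(block, word, max_extra): Counter containment check plus extra-count band
def py_is_anagram (block word : String) (max_extra : Int) : Bool :=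
  let bc := PySem.Dict.counter block.toList
  let wc := PySem.Dict.counter word.toList
  -- 'for ch, cnt in wc.items(): if bc.get(ch, 0) < cnt: return False'
  if wc.items.any (fun p => decide (bc.getD p.1 0 < p.2)) then false
  else
    let extra := bc.values.sum - wc.values.sum
    decide (0 ≤ extra ∧ extra ≤ max_extra)

-- get_extra_letters(block, word): replicate per-key count differences, then sort and join
def py_get_extra_letters (block word : String) : String :=
  let bc := PySem.Dict.counter block.toList
  let wc := PySem.Dict.counter word.toList
  let extras := bc.keys.foldl
    (fun acc ch => acc ++ List.replicate (bc.getD ch 0 - wc.getD ch 0).toNat ch) []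
  String.mk (PySem.List.sorted extras (fun x => x) false)

def find_anagram_matches (block : String) (wordset : List String) (max_extra : Int) : List (String × String) :=
  let block_len : Int := block.toList.length
  wordset.foldl
    (fun results word =>
      let wlen : Int := word.toList.length
      if wlen > block_len ∨ wlen < block_len - max_extra then results
      else if py_is_anagram block word max_extra then
        results ++ [(word, py_get_extra_letters block word)]
      else results)
    []

-- ===== PORT B =====
-- the 'for ch in sorted(word)' loop with its inner 'while sb[j] < ch' skip, as a merge recursion:
-- some extras = the skipped/unused block letters in order; none = some word letter unmatched
def mergeExtras : List Char → List Char → Option (List Char)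
  | sb, [] => some sb
  | [], _ :: _ => none
  | b :: sbs, w :: sws =>
      if b = w then mergeExtras sbs sws
      else if b < w then (mergeExtras sbs (w :: sws)).map (b :: ·)
      else none

def find_anagram_matches_alt (block : String) (wordset : List String) (max_extra : Int) : List (String × String) :=
  let sb := PySem.List.sorted block.toList (fun x => x) false
  let n : Int := sb.length
  wordset.foldl
    (fun results word =>
      if n - max_extra ≤ (word.toList.length : Int) ∧ (word.toList.length : Int) ≤ n then
        match mergeExtras sb (PySem.List.sorted word.toList (fun x => x) false) with
        | some extras => results ++ [(word, String.mk extras)]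
        | none => results
      else results)
    []

-- ===== PRECONDITION & SPEC =====
def Spec_find_anagram_matches (block : String) (wordset : List String) (max_extra : Int) (out : List (String × String)) : Prop := out = find_anagram_matches_alt block wordset max_extra
instance (block : String) (wordset : List String) (max_extra : Int) (out : List (String × String)) : Decidable (Spec_find_anagram_matches block wordset max_extra out) := by unfold Spec_find_anagram_matches; infer_instance

-- ===== CLAIM (what is proved, stated in full; the proofs are below) =====
def Claim_equal_find_anagram_matches : Prop := ∀ (block : String) (wordset : List String) (max_extra : Int), Dom_find_anagram_matches block wordset max_extra → Spec_find_anagram_matches block wordset max_extra (find_anagram_matches block wordset max_extra)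

-- ===== LEMMAS AND PROOFS =====

-- A's Counter-containment loop returns no failure iff every char count of wl fits in bl
lemma anagram_loop_iff (bl wl : List Char) :
    ((PySem.Dict.counter wl).items.any
      (fun p => decide ((PySem.Dict.counter bl).getD p.1 0 < p.2)) = false)
    ↔ ∀ c : Char, wl.count c ≤ bl.count c := by
  simp [PySem.Dict.items_counter, List.any_map, List.any_eq_false, PySem.Dict.getD_counter,
        PySem.Set.mem_ofList]
  constructor
  · intro h c
    by_cases hc : c ∈ wl
    · exact_mod_cast h c hc
    · simp [List.count_eq_zero_of_not_mem hc]
  · intro h c _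
    exact_mod_cast h c

-- sum of a Counter's values is the length of the counted list
lemma counter_values_sum (xs : List Char) :
    (PySem.Dict.counter xs).values.sum = (xs.length : Int) := by
  have hperm : (PySem.Set.ofList xs).Perm xs.dedup := by
    rw [List.perm_ext_iff_of_nodup (PySem.Set.nodup_ofList xs) xs.nodup_dedup]
    intro a; rw [PySem.Set.mem_ofList, List.mem_dedup]
  have hv : (PySem.Dict.counter xs).values
      = (PySem.Set.ofList xs).map (fun k => (xs.count k : Int)) := by
    simp only [PySem.Dict.values, PySem.Dict.items_counter, List.map_map]
    rfl
  rw [hv, (hperm.map _).sum_eq]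
  rw [show (fun k => (xs.count k : Int)) = (fun n : Nat => (n : Int)) ∘ (fun k => xs.count k) from rfl,
     ← List.map_map]
  rw [show ((xs.dedup.map fun k => xs.count k).map (fun n : Nat => (n : Int))).sum
      = (((xs.dedup.map fun k => xs.count k).sum : Nat) : Int) by push_cast; rfl]
  rw [List.sum_map_count_dedup_eq_length]

-- count of a char in a flatMap of per-key replicates over a duplicate-free key list
lemma count_flatMap_replicate {ks : List Char} (hnd : ks.Nodup) (n : Char → Nat) (c : Char) :
    (ks.flatMap (fun ch => List.replicate (n ch) ch)).count c = if c ∈ ks then n c else 0 := by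
  induction ks with
  | nil => simp
  | cons k t ih =>
      simp only [List.flatMap_cons, List.count_append, List.count_replicate,
        ih hnd.of_cons, List.mem_cons]
      rcases List.nodup_cons.mp hnd with ⟨hk, _⟩
      by_cases hck : c = k
      · subst hck; simp [hk]
      · simp [hck, Ne.symm hck]

-- count of each char in A's extras list (before sorting)
lemma extras_count (bl wl : List Char) (h : ∀ c : Char, wl.count c ≤ bl.count c) (c : Char) :
    ((PySem.Set.ofList bl).flatMap
      (fun ch => List.replicate (((bl.count ch : Int)) - ((wl.count ch : Int))).toNat ch)).count c
    = bl.count c - wl.count c := by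
  rw [count_flatMap_replicate (PySem.Set.nodup_ofList bl)]
  by_cases hc : c ∈ bl
  · simp [PySem.Set.mem_ofList, hc]
  · have h0 : bl.count c = 0 := List.count_eq_zero_of_not_mem hc
    have := h c
    simp [PySem.Set.mem_ofList, hc]; omega

-- merge success: extras ++ sw is a permutation of sb, and extras is a sublist of sb
lemma mergeExtras_some (sb sw ex : List Char) (h : mergeExtras sb sw = some ex) :
    (ex ++ sw).Perm sb ∧ ex.Sublist sb := by
  fun_induction mergeExtras sb sw generalizing ex with
  | case1 sb =>
      simp only [Option.some.injEq] at h; subst h; simp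
  | case2 w sws => simp at h
  | case3 sbs b sws ih =>
      rcases ih ex h with ⟨hp, hs⟩
      exact ⟨List.perm_middle.trans (hp.cons b), hs.cons b⟩
  | case4 b sbs w sws hne hlt ih =>
      rcases Option.map_eq_some_iff.mp h with ⟨ex', hex', rfl⟩
      rcases ih ex' hex' with ⟨hp, hs⟩
      refine ⟨?_, hs.cons₂ b⟩
      simpa using hp.cons b
  | case5 => simp at h

-- merge succeeds whenever the (sorted) word multiset fits in the (sorted) block multiset
lemma mergeExtras_isSome (sb sw : List Char) (hsb : sb.Pairwise (· ≤ ·)) (hsw : sw.Pairwise (· ≤ ·))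
    (h : ∀ c : Char, sw.count c ≤ sb.count c) : ∃ ex, mergeExtras sb sw = some ex := by
  fun_induction mergeExtras sb sw with
  | case1 sb => exact ⟨sb, rfl⟩
  | case2 w sws =>
      exact absurd (h w) (by simp)
  | case3 sbs b sws ih =>
      exact ih hsb.of_cons hsw.of_cons (fun c => by
        have := h c
        by_cases hc : c = b
        · subst hc; simpa using this
        · simpa [List.count_cons, hc, Ne.symm hc] using this)
  | case4 b sbs w sws hne hlt ih =>
      have hb : b ∉ w :: sws := by
        intro hmem
        rcases List.mem_cons.mp hmem with rfl | hmem
        · exact hne rfl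
        · have := (List.pairwise_cons.mp hsw).1 b hmem
          exact absurd hlt (not_lt.mpr this)
      rcases ih hsb.of_cons hsw (fun c => by
        have := h c
        by_cases hc : c = b
        · subst hc
          simp [List.count_eq_zero_of_not_mem hb]
        · simpa [List.count_cons, hc, Ne.symm hc] using this) with ⟨ex, hex⟩
      exact ⟨b :: ex, by simp [hex]⟩
  | case5 b sbs w sws hne hnlt =>
      have hw : w ∉ b :: sbs := by
        intro hmem
        rcases List.mem_cons.mp hmem with rfl | hmem
        · exact hne rfl
        · have := (List.pairwise_cons.mp hsb).1 w hmem
          have hbw : w < b := lt_of_le_of_ne (not_lt.mp hnlt) (fun e => hne e.symm)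
          exact absurd this (not_le.mpr hbw)
      have := h w
      simp [List.count_eq_zero_of_not_mem hw, List.count_cons_self] at this

-- per-word agreement of the two fold steps
lemma step_eq (block : String) (max_extra : Int) (acc : List (String × String)) (word : String) :
    (let block_len : Int := block.toList.length
     let wlen : Int := word.toList.length
     if wlen > block_len ∨ wlen < block_len - max_extra then acc
     else if py_is_anagram block word max_extra then
       acc ++ [(word, py_get_extra_letters block word)]
     else acc)
    =
    (let sb := PySem.List.sorted block.toList (fun x => x) false
     if ((sb.length : Int)) - max_extra ≤ (word.toList.length : Int) ∧ (word.toList.length : Int) ≤ (sb.length : Int) then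
       match mergeExtras sb (PySem.List.sorted word.toList (fun x => x) false) with
       | some extras => acc ++ [(word, String.mk extras)]
       | none => acc
     else acc) := by
  dsimp only
  have hsblen : (PySem.List.sorted block.toList (fun x => x) false).length = block.toList.length :=
    PySem.List.length_sorted block.toList (fun x => x) false
  by_cases hf : ((word.toList.length : Int) > (block.toList.length : Int) ∨
      (word.toList.length : Int) < (block.toList.length : Int) - max_extra)
  · rw [if_pos hf, if_neg (by rw [hsblen]; omega)]
  · rw [if_neg hf]
    have hB : ((PySem.List.sorted block.toList (fun x => x) false).length : Int) - max_extra ≤ (word.toList.length : Int) ∧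
        (word.toList.length : Int) ≤ ((PySem.List.sorted block.toList (fun x => x) false).length : Int) := by
      have := hsblen; omega
    have hsbpw : (PySem.List.sorted block.toList (fun x => x) false).Pairwise (· ≤ ·) := by
      simpa using PySem.List.sorted_pairwise block.toList (fun x => x)
    have hswpw : (PySem.List.sorted word.toList (fun x => x) false).Pairwise (· ≤ ·) := by
      simpa using PySem.List.sorted_pairwise word.toList (fun x => x)
    have hsbc : ∀ c, (PySem.List.sorted block.toList (fun x => x) false).count c = block.toList.count c :=
      fun c => (PySem.List.sorted_perm block.toList (fun x => x) false).count_eq c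
    have hswc : ∀ c, (PySem.List.sorted word.toList (fun x => x) false).count c = word.toList.count c :=
      fun c => (PySem.List.sorted_perm word.toList (fun x => x) false).count_eq c
    by_cases hA : ∀ c : Char, word.toList.count c ≤ block.toList.count c
    · have hany := (anagram_loop_iff block.toList word.toList).mpr hA
      have hia : py_is_anagram block word max_extra = true := by
        unfold py_is_anagram
        simp only [hany, Bool.false_eq_true, if_false, counter_values_sum, decide_eq_true_iff]
        omega
      rw [if_pos hia, if_pos hB]
      obtain ⟨ex, hex⟩ := mergeExtras_isSome _ _ hsbpw hswpw
        (fun c => by rw [hsbc, hswc]; exact hA c)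
      rw [hex]
      obtain ⟨hp, hs⟩ := mergeExtras_some _ _ _ hex
      have hex_eq : py_get_extra_letters block word = String.mk ex := by
        unfold py_get_extra_letters
        dsimp only
        simp only [PySem.Dict.keys_counter, PySem.Dict.getD_counter,
          PySem.List.foldl_append_eq_flatMap, List.nil_append]
        refine congrArg String.mk ?_
        refine PySem.List.sorted_id_eq_of_perm_of_pairwise _ _ ?_ (hsbpw.sublist hs)
        refine List.perm_iff_count.mpr (fun c => ?_)
        have hc1 := hp.count_eq c
        rw [List.count_append, hsbc, hswc] at hc1
        rw [extras_count block.toList word.toList hA c]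
        omega
      rw [hex_eq]
    · have hT : ((PySem.Dict.counter word.toList).items.any
          (fun p => decide ((PySem.Dict.counter block.toList).getD p.1 0 < p.2))) = true := by
        have : ¬ ((PySem.Dict.counter word.toList).items.any
            (fun p => decide ((PySem.Dict.counter block.toList).getD p.1 0 < p.2)) = false) :=
          fun h => hA ((anagram_loop_iff block.toList word.toList).mp h)
        simpa [Bool.not_eq_false] using this
      have hia : py_is_anagram block word max_extra = false := by
        unfold py_is_anagram
        dsimp only
        rw [hT]
        simp
      rw [if_neg (by simp [hia]), if_pos hB]
      have hm : mergeExtras (PySem.List.sorted block.toList (fun x => x) false)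
          (PySem.List.sorted word.toList (fun x => x) false) = none := by
        cases h : mergeExtras (PySem.List.sorted block.toList (fun x => x) false)
            (PySem.List.sorted word.toList (fun x => x) false) with
        | none => rfl
        | some ex =>
            refine absurd (fun c => ?_) hA
            have hc1 := (mergeExtras_some _ _ _ h).1.count_eq c
            rw [List.count_append, hsbc, hswc] at hc1
            omega
      rw [hm]

lemma fold_eq (block : String) (max_extra : Int) (ws : List String) (acc : List (String × String)) :
    ws.foldl
      (fun results word =>
        let wlen : Int := word.toList.length
        if wlen > (block.toList.length : Int) ∨ wlen < (block.toList.length : Int) - max_extra then results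
        else if py_is_anagram block word max_extra then
          results ++ [(word, py_get_extra_letters block word)]
        else results) acc
    = ws.foldl
      (fun results word =>
        if ((PySem.List.sorted block.toList (fun x => x) false).length : Int) - max_extra ≤ (word.toList.length : Int) ∧ (word.toList.length : Int) ≤ ((PySem.List.sorted block.toList (fun x => x) false).length : Int) then
          match mergeExtras (PySem.List.sorted block.toList (fun x => x) false) (PySem.List.sorted word.toList (fun x => x) false) with
          | some extras => results ++ [(word, String.mk extras)]
          | none => results
        else results) acc := by
  induction ws generalizing acc with
  | nil => rfl
  | cons w t ih =>
      simp only [List.foldl_cons]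
      rw [step_eq block max_extra acc w]
      exact ih _

-- ===== VERDICT (by name: the statement is the Claim_ definition above) =====
theorem find_anagram_matches_spec : Claim_equal_find_anagram_matches := by
  intro block wordset max_extra _
  unfold Spec_find_anagram_matches find_anagram_matches find_anagram_matches_alt
  exact fold_eq block max_extra wordset []
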